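-- pv_equiv track=rewrite | github.com/amandavical/estrutura-de-dados | lista1/recursividade.py | removePares
-- ===== SOURCE A (Python) =====
-- def removePares(n):
--     if n < 10:
--         if n % 2 == 0:
--             return 0
--         return n
--     menor_resto = removePares(n // 10)
--     ultimo_digito = n % 10
--
--     if ultimo_digito % 2 ==0:
--        return menor_resto  # Ignora este dígito
--     else:
--       return menor_resto * 10 + ultimo_digito # Adiciona ao número reconstruído
-- ===== SOURCE B (Python) =====
-- def removePares(n):
--     if n < 10:
--         return 0 if n % 2 == 0 else n
--     digits = []
--     while n:
--         digits.append(n % 10)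
--         n //= 10
--     result = 0
--     for d in reversed(digits):
--         if d % 2 != 0:
--             result = result * 10 + d
--     return result
-- ===== Notes on version B (the rewrite author's own statement) =====
-- stated objective: alternative
-- what changed: Replaces the head recursion over n//10 by an explicit two-phase iteration: a while-loop collects the digits least-significant first, then a forward loop over the reversed digit list accumulates the odd digits.
import Mathlib
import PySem

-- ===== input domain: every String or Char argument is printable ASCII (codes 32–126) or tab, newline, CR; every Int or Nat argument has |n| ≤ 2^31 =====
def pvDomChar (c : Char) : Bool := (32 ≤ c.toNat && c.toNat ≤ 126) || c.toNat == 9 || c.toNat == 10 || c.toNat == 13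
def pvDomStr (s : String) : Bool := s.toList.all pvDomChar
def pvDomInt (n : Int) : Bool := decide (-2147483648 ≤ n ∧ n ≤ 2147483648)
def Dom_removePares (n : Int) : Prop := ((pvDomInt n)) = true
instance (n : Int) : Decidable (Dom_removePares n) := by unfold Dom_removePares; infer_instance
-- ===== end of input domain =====

-- B replaces A's head recursion by an explicit two-phase iteration (collect digits, then a
-- forward fold over them); same values everywhere, objective: alternative decomposition.

-- ===== PORT A =====
def removePares (n : Int) : Int :=
  if n < 10 then
    if PySem.Int.mod n 2 = 0 then 0 else n
  else
    let menor_resto := removePares (PySem.Int.floordiv n 10)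
    let ultimo_digito := PySem.Int.mod n 10
    if PySem.Int.mod ultimo_digito 2 = 0 then menor_resto
    else menor_resto * 10 + ultimo_digito
termination_by n.toNat
decreasing_by
  rw [PySem.Int.floordiv_eq_ediv_of_pos (by norm_num : (0:Int) < 10)]
  omega

-- ===== PORT B =====
-- Python's `while n:` loop; it is only reached with n ≥ 10, where the guard `n ≤ 0`
-- coincides with `n = 0` (a totality guard: for negative n Python's loop would not terminate).
def pvDigitsRev (n : Int) : List Int :=
  if n ≤ 0 then []
  else PySem.Int.mod n 10 :: pvDigitsRev (PySem.Int.floordiv n 10)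
termination_by n.toNat
decreasing_by
  rw [PySem.Int.floordiv_eq_ediv_of_pos (by norm_num : (0:Int) < 10)]
  omega

def removePares_alt (n : Int) : Int :=
  if n < 10 then
    if PySem.Int.mod n 2 = 0 then 0 else n
  else
    (pvDigitsRev n).reverse.foldl
      (fun result d => if PySem.Int.mod d 2 ≠ 0 then result * 10 + d else result) 0

-- ===== PRECONDITION & SPEC =====
def Spec_removePares (n : Int) (out : Int) : Prop := out = removePares_alt n
instance (n : Int) (out : Int) : Decidable (Spec_removePares n out) := by unfold Spec_removePares; infer_instance

-- ===== CLAIM (what is proved, stated in full; the proofs are below) =====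
def Claim_equal_removePares : Prop := ∀ (n : Int), Dom_removePares n → Spec_removePares n (removePares n)

-- ===== LEMMAS AND PROOFS =====

-- the fold over the reversed digit list computes A's recursion, for every positive n
theorem pvFold_digits_eq (n : Int) (hn : 0 < n) :
    (pvDigitsRev n).reverse.foldl
      (fun result d => if PySem.Int.mod d 2 ≠ 0 then result * 10 + d else result) 0
    = removePares n := by
  generalize hk : n.toNat = k
  induction k using Nat.strong_induction_on generalizing n with
  | _ k ih =>
  have hten : (0:Int) < 10 := by norm_num
  have htwo : (0:Int) < 2 := by norm_num
  rw [pvDigitsRev, if_neg (by omega : ¬ n ≤ 0)]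
  rw [PySem.Int.floordiv_eq_ediv_of_pos hten, PySem.Int.mod_eq_emod_of_pos hten]
  by_cases h : n < 10
  · have hq : n / 10 = 0 := by omega
    rw [hq, pvDigitsRev, if_pos (le_refl (0:Int))]
    have hm : n % 10 = n := by omega
    rw [hm, removePares, if_pos h]
    simp only [List.reverse_cons, List.reverse_nil, List.nil_append, List.foldl_cons,
      List.foldl_nil]
    rw [PySem.Int.mod_eq_emod_of_pos htwo]
    by_cases h2 : n % 2 = 0
    · rw [if_pos h2, if_neg (by omega)]
    · rw [if_neg h2, if_pos (by omega)]
      ring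
  · have hq : 0 < n / 10 := by omega
    rw [List.reverse_cons, List.foldl_append]
    rw [ih (n / 10).toNat (by omega) (n / 10) hq rfl]
    conv_rhs => rw [removePares]
    rw [if_neg h]
    rw [PySem.Int.floordiv_eq_ediv_of_pos hten, PySem.Int.mod_eq_emod_of_pos hten]
    simp only [List.foldl_cons, List.foldl_nil]
    rw [PySem.Int.mod_eq_emod_of_pos htwo]
    by_cases h2 : n % 10 % 2 = 0
    · rw [if_pos h2, if_neg (by omega)]
    · rw [if_neg h2, if_pos (by omega)]

theorem removePares_spec : Claim_equal_removePares := by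
  intro n _
  unfold Spec_removePares removePares_alt
  by_cases h : n < 10
  · rw [if_pos h, removePares, if_pos h]
  · rw [if_neg h, pvFold_digits_eq n (by omega)]
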